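-- pv_equiv track=rewrite | github.com/gobbleyourdong/open_problems | math/p_vs_np/numerics/exponent_race.py | graph_coloring_bt
-- ===== SOURCE A (Python) =====
-- def graph_coloring_bt(adj, n_colors=3):
--     """Backtracking graph coloring. Count nodes."""
--     n = len(adj)
--     nodes = [0]
--     def solve(colors, v):
--         nodes[0] += 1
--         if v == n: return True
--         for c in range(n_colors):
--             ok = True
--             for u in range(n):
--                 if adj[v][u] and u < v and colors[u] == c:
--                     ok = False; break
--             if ok:
--                 colors[v] = c
--                 if solve(colors, v+1): return True
--                 colors[v] = -1
--         return False
--     solve([-1]*n, 0)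
--     return nodes[0]
-- ===== SOURCE B (Python) =====
-- def graph_coloring_bt(adj, n_colors=3):
--     """Backtracking graph coloring, node count -- iterative DFS over an explicit
--     stack of [vertex, next-color] frames instead of recursion."""
--     n = len(adj)
--     colors = [-1] * n
--     stack = [[0, 0]]
--     nodes = 1
--     while stack:
--         v, c = stack[-1]
--         if v >= n:
--             return nodes
--         colors[v] = -1
--         if c >= n_colors:
--             stack.pop()
--             continue
--         stack[-1][1] = c + 1
--         ok = True
--         for u in range(n):
--             if adj[v][u] and u < v and colors[u] == c:
--                 ok = False
--                 break
--         if ok: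
--             colors[v] = c
--             stack.append([v + 1, 0])
--             nodes += 1
--     return nodes
-- ===== Notes on version B (the rewrite author's own statement) =====
-- stated objective: alternative
-- what changed: The recursive backtracking search (nested solve() with a mutable nodes[0] cell) is rewritten as an iterative DFS: a while loop over an explicit stack of [vertex, next-color] frames with an explicit node counter and in-place color reset on backtrack.
-- outside the precondition, e.g. on graph_coloring_bt([[0, 0], [1]], 1): A returns 2, B returns 2
import Mathlib
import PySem

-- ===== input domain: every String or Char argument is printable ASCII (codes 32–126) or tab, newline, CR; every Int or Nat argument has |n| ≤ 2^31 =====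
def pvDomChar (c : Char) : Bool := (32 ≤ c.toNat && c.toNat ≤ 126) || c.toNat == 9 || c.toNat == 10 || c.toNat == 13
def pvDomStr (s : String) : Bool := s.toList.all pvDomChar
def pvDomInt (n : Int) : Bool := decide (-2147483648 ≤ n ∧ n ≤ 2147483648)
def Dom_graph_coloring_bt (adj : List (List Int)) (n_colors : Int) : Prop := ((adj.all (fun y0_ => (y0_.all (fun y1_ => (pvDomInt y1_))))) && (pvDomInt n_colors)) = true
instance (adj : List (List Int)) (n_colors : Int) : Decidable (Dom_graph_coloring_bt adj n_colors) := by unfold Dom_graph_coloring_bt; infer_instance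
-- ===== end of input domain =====

-- B replaces A's recursive backtracking with an iterative DFS over an explicit stack of
-- (vertex, next-color) frames; same search, same node count; a different decomposition, not faster.


-- ===== PORT A =====
-- the inner `for u in range(n): if adj[v][u] and u < v and colors[u] == c: ok = False; break`
-- (textually identical in A and in B, so shared by both ports); us = the remaining range(n)
def okScan (adj : List (List Int)) (colors : List Int) (v : Nat) (c : Int) : List Nat → Bool
  | [] => true
  | u :: us =>
    if PySem.List.pyGetD (PySem.List.pyGetD adj (v : Int) []) (u : Int) 0 ≠ 0 ∧ u < v ∧
        PySem.List.pyGetD colors (u : Int) 0 = c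
    then false
    else okScan adj colors v c us

-- `solve(colors, v)`: returns (found, number of solve calls made); recursion on k = n - v;
-- colors is passed functionally, so the `colors[v] = -1` reset on backtrack is implicit
mutual
def solveA (adj : List (List Int)) (nc : Int) (colors : List Int) (v : Nat) (k : Nat) : Bool × Int :=
  match k with
  | 0 => (true, 1)                                   -- v == n
  | Nat.succ k' => loopA adj nc colors v k' (PySem.List.pyRange 0 nc 1) 1   -- own node counted in acc
termination_by (k, 0, 0)

-- the `for c in range(n_colors)` loop; acc accumulates the node count
def loopA (adj : List (List Int)) (nc : Int) (colors : List Int) (v : Nat) (k : Nat) :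
    List Int → Int → Bool × Int
  | [], acc => (false, acc)
  | c :: cs, acc =>
    if okScan adj colors v c (List.range adj.length) then
      let r := solveA adj nc (colors.set v c) (v + 1) k
      if r.1 then (true, acc + r.2) else loopA adj nc colors v k cs (acc + r.2)
    else loopA adj nc colors v k cs acc
termination_by cs _ => (k, 1, cs.length)
end

def graph_coloring_bt (adj : List (List Int)) (n_colors : Int) : Int :=
  (solveA adj n_colors (List.replicate adj.length (-1)) 0 adj.length).2

-- ===== PORT B =====
-- termination measure for the stack machine: potential of a fresh frame k levels above the leaves
def gPot (nc : Int) : Nat → Nat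
  | 0 => 1
  | k + 1 => nc.toNat * (1 + gPot nc k) + 1

def potF (n : Nat) (nc : Int) (f : Nat × Int) : Nat :=
  if f.1 < n then (nc - f.2).toNat * (1 + gPot nc (n - f.1 - 1)) + 1 else 1

theorem potF_pos (n : Nat) (nc : Int) (f : Nat × Int) : 1 ≤ potF n nc f := by
  unfold potF; split <;> omega

theorem potF_child (n : Nat) (nc : Int) (v : Nat) (h : v < n) :
    potF n nc (v + 1, 0) = gPot nc (n - v - 1) := by
  unfold potF
  by_cases h2 : v + 1 < n
  · have hk : n - v - 1 = (n - (v + 1) - 1) + 1 := by omega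
    simp only [if_pos h2, hk, gPot, Int.sub_zero]
  · have hk : n - v - 1 = 0 := by omega
    simp [if_neg h2, hk, gPot]

theorem potF_succ (n : Nat) (nc : Int) (v : Nat) (c : Int) (h : v < n) (hc : c < nc) :
    potF n nc (v, c) = potF n nc (v, c + 1) + (1 + gPot nc (n - v - 1)) := by
  unfold potF
  simp only [if_pos h]
  have : (nc - c).toNat = (nc - (c + 1)).toNat + 1 := by omega
  rw [this]; ring

-- the `while stack:` loop of B; a frame (v, c) = [vertex, next colour to try]
def runB (adj : List (List Int)) (n : Nat) (nc : Int) (stack : List (Nat × Int))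
    (colors : List Int) (nodes : Int) : Int :=
  match stack with
  | [] => nodes
  | (v, c) :: rest =>
    if h1 : n ≤ v then nodes                                   -- v >= n: found, return nodes
    else
      let colors1 := colors.set v (-1)                          -- colors[v] = -1
      if h2 : nc ≤ c then runB adj n nc rest colors1 nodes      -- colours exhausted: pop
      else if okScan adj colors1 v c (List.range adj.length) then
        runB adj n nc ((v + 1, 0) :: (v, c + 1) :: rest) (colors1.set v c) (nodes + 1)
      else runB adj n nc ((v, c + 1) :: rest) colors1 nodes
termination_by (stack.map (potF n nc)).sum
decreasing_by
  · have := potF_pos n nc (v, c); simp; omega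
  · have hv : v < n := by omega
    have hc : c < nc := by omega
    simp only [List.map_cons, List.sum_cons, potF_child n nc v hv, potF_succ n nc v c hv hc]
    omega
  · have hv : v < n := by omega
    have hc : c < nc := by omega
    simp only [List.map_cons, List.sum_cons, potF_succ n nc v c hv hc]
    omega

def graph_coloring_bt_alt (adj : List (List Int)) (n_colors : Int) : Int :=
  runB adj adj.length n_colors [(0, 0)] (List.replicate adj.length (-1)) 1

-- ===== PRECONDITION & SPEC =====
-- Pre_ excludes adjacency lists with a row shorter than len(adj) when n_colors ≥ 1: the inner scan
-- indexes adj[v][u] for u up to len(adj)-1 and in general raises IndexError there; on the few such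
-- inputs where an early break happens to avoid the out-of-range access both A and B return the
-- same value anyway (see cites).
def Pre_graph_coloring_bt (adj : List (List Int)) (n_colors : Int) : Prop :=
  n_colors ≤ 0 ∨ ∀ row ∈ adj, adj.length ≤ row.length
instance (adj : List (List Int)) (n_colors : Int) : Decidable (Pre_graph_coloring_bt adj n_colors) := by
  unfold Pre_graph_coloring_bt; infer_instance

def pvWitness_graph_coloring_bt : List (List Int) × Int := ([[0, 1], [1, 0]], 2)

def Spec_graph_coloring_bt (adj : List (List Int)) (n_colors : Int) (out : Int) : Prop := out = graph_coloring_bt_alt adj n_colors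
instance (adj : List (List Int)) (n_colors : Int) (out : Int) : Decidable (Spec_graph_coloring_bt adj n_colors out) := by unfold Spec_graph_coloring_bt; infer_instance

-- ===== CLAIM (what is proved, stated in full; the proofs are below) =====
def Claim_equal_graph_coloring_bt : Prop := ∀ (adj : List (List Int)) (n_colors : Int), Dom_graph_coloring_bt adj n_colors → Pre_graph_coloring_bt adj n_colors → Spec_graph_coloring_bt adj n_colors (graph_coloring_bt adj n_colors)

-- ===== LEMMAS AND PROOFS =====
theorem getD_set' (l : List Int) (i j : Nat) (a : Int) :
    (l.set i a).getD j 0 = if i = j ∧ i < l.length then a else l.getD j 0 := by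
  simp only [List.getD_eq_getElem?_getD, List.getElem?_set]
  by_cases h : i = j
  · subst h; by_cases h2 : i < l.length <;> simp [h2]
  · simp [h]

theorem set_getD_self (l : List Int) (i : Nat) : l.set i (l.getD i 0) = l := by
  apply List.ext_getElem?; intro j
  rw [List.getElem?_set]
  by_cases h : i = j
  · subst h
    by_cases h2 : i < l.length
    · simp [h2, List.getD_eq_getElem?_getD]
    · simp only [if_neg h2]
      exact (List.getElem?_eq_none (Nat.le_of_not_lt h2)).symm
  · simp [h]

theorem set_self_of_getD (l : List Int) (i : Nat) (a : Int) (h : i < l.length → l.getD i 0 = a) :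
    l.set i a = l := by
  by_cases h2 : i < l.length
  · rw [← h h2]; exact set_getD_self l i
  · rw [List.set_eq_of_length_le (by omega)]

-- okScan only reads colors[u] at u < v (the u < v conjunct short-circuits the rest)
theorem okScan_congr (adj : List (List Int)) (c1 c2 : List Int) (v : Nat) (c : Int)
    (h : ∀ u, u < v → c1.getD u 0 = c2.getD u 0) :
    ∀ us, okScan adj c1 v c us = okScan adj c2 v c us := by
  intro us; induction us with
  | nil => rfl
  | cons u us ih =>
    simp only [okScan, PySem.List.pyGetD_natCast]
    by_cases hu : u < v
    · rw [h u hu]; split <;> simp [ih]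
    · simp [hu, ih]

-- the accumulator of loopA is additive
theorem loopA_acc (adj : List (List Int)) (nc : Int) (colors : List Int) (v k : Nat) :
    ∀ cs acc, loopA adj nc colors v k cs acc =
      ((loopA adj nc colors v k cs 0).1, acc + (loopA adj nc colors v k cs 0).2) := by
  intro cs; induction cs with
  | nil => intro acc; simp [loopA]
  | cons c cs ih =>
    intro acc
    simp only [loopA]
    split
    · split
      · simp
      · rw [ih, ih ((0 : Int) + _)]
        all_goals try (refine Prod.ext ?_ ?_ <;> simp <;> try ring)
    · rw [ih, ih 0]

theorem loopA_acc_fst (adj : List (List Int)) (nc : Int) (colors : List Int) (v k : Nat)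
    (cs : List Int) (acc : Int) :
    (loopA adj nc colors v k cs acc).1 = (loopA adj nc colors v k cs 0).1 := by
  rw [loopA_acc adj nc colors v k cs acc]

theorem loopA_acc_snd (adj : List (List Int)) (nc : Int) (colors : List Int) (v k : Nat)
    (cs : List Int) (acc : Int) :
    (loopA adj nc colors v k cs acc).2 = acc + (loopA adj nc colors v k cs 0).2 := by
  rw [loopA_acc adj nc colors v k cs acc]

-- the simulation: a fresh frame (v,0) on top of the machine stack behaves like solve(colors, v);
-- cs: entries above v are -1 (the machine's backtracking invariant)
theorem simB (adj : List (List Int)) (nc : Int) :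
    ∀ k v (rest : List (Nat × Int)) (cs : List Int) (m : Int),
      v + k = adj.length → cs.length = adj.length →
      (∀ u, v < u → u < adj.length → cs.getD u 0 = -1) →
      runB adj adj.length nc ((v, 0) :: rest) cs m =
        (if (solveA adj nc cs v k).1
         then m + (solveA adj nc cs v k).2 - 1
         else runB adj adj.length nc rest (cs.set v (-1)) (m + (solveA adj nc cs v k).2 - 1)) := by
  intro k
  induction k with
  | zero =>
    intro v rest cs m hvk hlen hinv
    rw [runB]
    simp only [solveA]
    have hv : adj.length ≤ v := by omega
    simp [hv]
  | succ k ihk =>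
    intro v rest cs m hvk hlen hinv
    have hv : v < adj.length := by omega
    -- inner loop: frame (v, c) with machine colors cs.set v x simulates loopA from colour c
    have Lloop : ∀ j (c x : Int) (cs2 : List Int) (m2 : Int) (rest2 : List (Nat × Int)),
        (nc - c).toNat = j → cs2.length = adj.length →
        (∀ u, v < u → u < adj.length → cs2.getD u 0 = -1) →
        runB adj adj.length nc ((v, c) :: rest2) (cs2.set v x) m2 =
          (if (loopA adj nc cs2 v k (PySem.List.pyRange c nc 1) 0).1
           then m2 + (loopA adj nc cs2 v k (PySem.List.pyRange c nc 1) 0).2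
           else runB adj adj.length nc rest2 (cs2.set v (-1))
                  (m2 + (loopA adj nc cs2 v k (PySem.List.pyRange c nc 1) 0).2)) := by
      intro j
      induction j with
      | zero =>
        intro c x cs2 m2 rest2 hj hlen2 hinv2
        have hc : nc ≤ c := by omega
        rw [runB]
        rw [PySem.List.pyRange_one_eq_nil hc]
        simp only [loopA, List.set_set]
        simp [hv, hc]
      | succ j ihj =>
        intro c x cs2 m2 rest2 hj hlen2 hinv2
        have hc : c < nc := by omega
        rw [runB]
        simp only [dif_neg (by omega : ¬ adj.length ≤ v), dif_neg (by omega : ¬ nc ≤ c),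
          List.set_set]
        rw [PySem.List.pyRange_one_cons hc]
        have hok : okScan adj (cs2.set v (-1)) v c (List.range adj.length) =
            okScan adj cs2 v c (List.range adj.length) := by
          apply okScan_congr
          intro u hu
          rw [getD_set']
          rw [if_neg (show ¬ (v = u ∧ v < cs2.length) from fun hh => by omega)]
        rw [hok]
        simp only [loopA]
        rcases Bool.eq_false_or_eq_true (okScan adj cs2 v c (List.range adj.length)) with
          hok2 | hok2
        · -- colour c admissible: assign it, push the child frame
          rw [if_pos hok2, if_pos hok2]
          have hmach := ihk (v + 1) ((v, c + 1) :: rest2) (cs2.set v c) (m2 + 1)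
            (by omega) (by simp [hlen2])
            (by intro u h1 h2
                rw [getD_set']
                rw [if_neg (show ¬ (v = u ∧ v < cs2.length) from fun hh => by omega)]
                exact hinv2 u (by omega) h2)
          rw [hmach]
          rcases Bool.eq_false_or_eq_true ((solveA adj nc (cs2.set v c) (v + 1) k).1) with
            hr1 | hr1
          · -- child subtree found a colouring: both sides stop
            rw [if_pos hr1, if_pos hr1]
            simp only [Prod.fst, Prod.snd]
            rw [if_pos trivial]
            omega
          · -- child subtree failed: continue with colour c + 1 on both sides
            have hr1' : ¬ ((solveA adj nc (cs2.set v c) (v + 1) k).1 = true) := by simp [hr1]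
            rw [if_neg hr1', if_neg hr1']
            have hsame : (cs2.set v c).set (v + 1) (-1) = cs2.set v c := by
              apply set_self_of_getD
              intro hlt
              rw [getD_set']
              simp only [List.length_set] at hlt
              rw [if_neg (show ¬ (v = v + 1 ∧ v < cs2.length) from fun hh => by omega)]
              exact hinv2 (v + 1) (by omega) (by omega)
            rw [hsame]
            rw [ihj (c + 1) c cs2 (m2 + 1 + (solveA adj nc (cs2.set v c) (v + 1) k).2 - 1) rest2
              (by omega) hlen2 hinv2]
            rw [loopA_acc_fst adj nc cs2 v k (PySem.List.pyRange (c + 1) nc 1)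
              ((0 : Int) + (solveA adj nc (cs2.set v c) (v + 1) k).2),
              loopA_acc_snd adj nc cs2 v k (PySem.List.pyRange (c + 1) nc 1)
              ((0 : Int) + (solveA adj nc (cs2.set v c) (v + 1) k).2)]
            rcases Bool.eq_false_or_eq_true
              ((loopA adj nc cs2 v k (PySem.List.pyRange (c + 1) nc 1) 0).1) with hb | hb
            · rw [if_pos hb, if_pos hb]
              omega
            · have hb' : ¬ ((loopA adj nc cs2 v k (PySem.List.pyRange (c + 1) nc 1) 0).1 = true) := by
                simp [hb]
              rw [if_neg hb', if_neg hb']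
              congr 1
              omega
        · -- colour c conflicts: both sides skip to c + 1
          have hok2' : ¬ (okScan adj cs2 v c (List.range adj.length) = true) := by simp [hok2]
          rw [if_neg hok2', if_neg hok2']
          exact ihj (c + 1) (-1) cs2 m2 rest2 (by omega) hlen2 hinv2
    -- apply the loop lemma at c = 0 with machine colors written as cs.set v (cs.getD v 0)
    have hcs : cs = cs.set v (cs.getD v 0) := (set_getD_self cs v).symm
    rw [show runB adj adj.length nc ((v, (0 : Int)) :: rest) cs m =
          runB adj adj.length nc ((v, (0 : Int)) :: rest) (cs.set v (cs.getD v 0)) m from by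
        rw [← hcs]]
    rw [Lloop (nc - 0).toNat 0 (cs.getD v 0) cs m rest rfl hlen hinv]
    have h1 : (solveA adj nc cs v (k + 1)).1 =
        (loopA adj nc cs v k (PySem.List.pyRange 0 nc 1) 0).1 := by
      simp only [solveA]
      rw [loopA_acc_fst]
    have h2 : (solveA adj nc cs v (k + 1)).2 =
        1 + (loopA adj nc cs v k (PySem.List.pyRange 0 nc 1) 0).2 := by
      simp only [solveA]
      rw [loopA_acc_snd]
    rw [h1, h2]
    rcases Bool.eq_false_or_eq_true ((loopA adj nc cs v k (PySem.List.pyRange 0 nc 1) 0).1) with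
      hb | hb
    · rw [if_pos hb, if_pos hb]
      omega

    · have hb' : ¬ ((loopA adj nc cs v k (PySem.List.pyRange 0 nc 1) 0).1 = true) := by simp [hb]
      rw [if_neg hb', if_neg hb']
      congr 1
      omega
-- ===== VERDICT (by name: the statement is the Claim_ definition above) =====
theorem graph_coloring_bt_spec : Claim_equal_graph_coloring_bt := by
  intro adj nc _dom _pre
  unfold Spec_graph_coloring_bt graph_coloring_bt graph_coloring_bt_alt
  rw [simB adj nc adj.length 0 [] (List.replicate adj.length (-1)) 1 (by omega)
      (by simp)
      (by intro u _ hu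
          simp [List.getD_eq_getElem?_getD, hu])]
  rcases Bool.eq_false_or_eq_true ((solveA adj nc (List.replicate adj.length (-1)) 0 adj.length).1)
    with hb | hb
  · rw [if_pos hb]
    omega
  · have hb' : ¬ ((solveA adj nc (List.replicate adj.length (-1)) 0 adj.length).1 = true) := by
      simp [hb]
    rw [if_neg hb', runB]
    omega
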